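-- pv_equiv track=rewrite | github.com/muhffikkri/daspro | praktikum_12/pembahasan soal daspro 21 22.py | bukan_kelipatan5
-- ===== SOURCE A (Python) =====
-- def IsEmpty(L) :
--     return L == []
--
-- def Akar(P):
--     return P[0]
--
-- def Konso(e, L) :
--     return [e] + L
--
-- def FirstElmt(L) :
--     return L[0]
--
-- def Tail(L) :
--     return L[1:]
--
-- IsMultipleOF5 = lambda x : x % 5 == 0
--
-- def bukan_kelipatan5(L) :
--     if IsEmpty(L) :
--         return []
--     else :
--         if IsMultipleOF5(FirstElmt(L)) :
--             return bukan_kelipatan5(Tail(L))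
--         else :
--             return Konso(Akar(L), bukan_kelipatan5(Tail(L)))
-- ===== SOURCE B (Python) =====
-- def bukan_kelipatan5(L):
--     result = []
--     for x in L:
--         if x % 5 != 0:
--             result.append(x)
--     return result
-- ===== Notes on version B (the rewrite author's own statement) =====
-- stated objective: faster
-- what changed: Replaced the head/tail recursion (whose Tail slicing and list concatenation copy the list at every step) by a single iterative loop appending non-multiples of 5 to an accumulator.
import Mathlib
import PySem

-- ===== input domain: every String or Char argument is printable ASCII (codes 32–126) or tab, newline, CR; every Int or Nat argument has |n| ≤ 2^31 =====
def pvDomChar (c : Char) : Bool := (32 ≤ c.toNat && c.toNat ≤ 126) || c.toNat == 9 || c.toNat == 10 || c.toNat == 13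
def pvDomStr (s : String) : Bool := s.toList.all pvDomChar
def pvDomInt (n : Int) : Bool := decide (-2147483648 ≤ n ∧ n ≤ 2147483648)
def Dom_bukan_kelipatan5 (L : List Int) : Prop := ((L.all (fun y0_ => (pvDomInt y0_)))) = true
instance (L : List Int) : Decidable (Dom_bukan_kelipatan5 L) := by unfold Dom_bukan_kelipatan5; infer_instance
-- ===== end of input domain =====

-- B replaces the head/tail recursion (O(n^2) from per-step slicing/concatenation) by a single O(n) accumulator loop.


-- ===== PORT A =====
-- helpers as in the Python source
def pvIsEmpty (L : List Int) : Bool := L == []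
def pvAkar (P : List Int) : Int := (PySem.List.pyGet? P 0).getD 0      -- P[0]; total only for nonempty P (A only calls it then)
def pvKonso (e : Int) (L : List Int) : List Int := [e] ++ L
def pvFirstElmt (L : List Int) : Int := (PySem.List.pyGet? L 0).getD 0
def pvTail (L : List Int) : List Int := PySem.List.slice L (some 1) none
def pvIsMultipleOF5 (x : Int) : Bool := PySem.Int.mod x 5 == 0

def bukan_kelipatan5 (L : List Int) : List Int :=
  if pvIsEmpty L then []
  else
    if pvIsMultipleOF5 (pvFirstElmt L) then bukan_kelipatan5 (pvTail L)
    else pvKonso (pvAkar L) (bukan_kelipatan5 (pvTail L))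
termination_by L.length
decreasing_by
  all_goals
    cases L with
    | nil => simp [pvIsEmpty] at *
    | cons a t => simp [pvTail, PySem.List.slice_from_one]

-- ===== PORT B =====
def bukan_kelipatan5_alt (L : List Int) : List Int :=
  L.foldl (fun result x => if PySem.Int.mod x 5 != 0 then result ++ [x] else result) []

-- ===== PRECONDITION & SPEC =====
def Spec_bukan_kelipatan5 (L : List Int) (out : List Int) : Prop := out = bukan_kelipatan5_alt L
instance (L : List Int) (out : List Int) : Decidable (Spec_bukan_kelipatan5 L out) := by unfold Spec_bukan_kelipatan5; infer_instance

-- ===== CLAIM (what is proved, stated in full; the proofs are below) =====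
def Claim_equal_bukan_kelipatan5 : Prop := ∀ (L : List Int), Dom_bukan_kelipatan5 L → Spec_bukan_kelipatan5 L (bukan_kelipatan5 L)

-- ===== LEMMAS AND PROOFS =====
theorem alt_acc (L : List Int) (acc : List Int) :
    L.foldl (fun result x => if PySem.Int.mod x 5 != 0 then result ++ [x] else result) acc
      = acc ++ L.foldl (fun result x => if PySem.Int.mod x 5 != 0 then result ++ [x] else result) [] := by
  induction L generalizing acc with
  | nil => simp
  | cons a t ih =>
    simp only [List.foldl_cons]
    rw [ih]
    conv_rhs => rw [ih]
    split_ifs <;> simp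

theorem a_eq_b (L : List Int) : bukan_kelipatan5 L = bukan_kelipatan5_alt L := by
  induction L with
  | nil => simp [bukan_kelipatan5, pvIsEmpty, bukan_kelipatan5_alt]
  | cons a t ih =>
    have ht : pvTail (a :: t) = t := by simp [pvTail, PySem.List.slice_from_one]
    rw [bukan_kelipatan5, ht]
    simp only [bukan_kelipatan5_alt, List.foldl_cons]
    rw [alt_acc]
    simp only [bukan_kelipatan5_alt] at ih
    simp only [ih]
    by_cases h : (5:Int) ∣ a <;>
      simp [pvIsEmpty, pvIsMultipleOF5, pvFirstElmt, pvAkar, pvKonso,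
            h]

-- ===== VERDICT (by name: the statement is the Claim_ definition above) =====
theorem bukan_kelipatan5_spec : Claim_equal_bukan_kelipatan5 := by
  intro L _
  exact a_eq_b L
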